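-- pv_equiv track=rewrite | github.com/jeqcho/single-winner-generative-social-choice | scripts/recompute_epsilons_conservative_abortion.py | construct_101_preferences
-- ===== SOURCE A (Python) =====
-- from typing import List, Dict, Optional
--
-- def construct_101_preferences(
--     preferences: List[List[str]],
--     insertion_positions: List[int]
-- ) -> List[List[str]]:
--     """
--     Construct 101-alternative preference profile by inserting new statement.
--     """
--     n_ranks = len(preferences)
--     n_voters = len(preferences[0]) if preferences else 0
--
--     voter_rankings = []
--     for voter_idx in range(n_voters):
--         ranking = [preferences[rank][voter_idx] for rank in range(n_ranks)]
--         voter_rankings.append(ranking)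
--
--     for voter_idx, pos in enumerate(insertion_positions):
--         if pos is not None and voter_idx < len(voter_rankings):
--             pos = max(0, min(pos, len(voter_rankings[voter_idx])))
--             voter_rankings[voter_idx].insert(pos, "100")
--
--     n_new_ranks = 101
--     new_preferences = []
--     for rank in range(n_new_ranks):
--         rank_row = []
--         for voter_idx in range(n_voters):
--             if rank < len(voter_rankings[voter_idx]):
--                 rank_row.append(voter_rankings[voter_idx][rank])
--             else:
--                 rank_row.append("100")
--         new_preferences.append(rank_row)
--
--     return new_preferences
-- ===== SOURCE B (Python) =====
-- def construct_101_preferences(preferences, insertion_positions):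
--     n_ranks = len(preferences)
--     n_voters = len(preferences[0]) if preferences else 0
--
--     # clamped insertion position per voter (None = no insertion)
--     pos = []
--     for v in range(n_voters):
--         p = insertion_positions[v] if v < len(insertion_positions) else None
--         pos.append(None if p is None else max(0, min(p, n_ranks)))
--
--     out = []
--     for r in range(101):
--         row = []
--         for v in range(n_voters):
--             p = pos[v]
--             if p is None:
--                 src = r
--             elif r == p:
--                 row.append("100")
--                 continue
--             else:
--                 src = r if r < p else r - 1
--             row.append(preferences[src][v] if src < n_ranks else "100")
--         out.append(row)
--     return out
-- ===== Notes on version B (the rewrite author's own statement) =====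
-- stated objective: alternative
-- what changed: B never builds per-voter ranking lists: it precomputes each voter's clamped insertion position once and fills the 101-row matrix cell-by-cell with offset indexing into the original preferences (no transpose, no list.insert), emitting '100' for the inserted rank and for out-of-range padding.
import Mathlib
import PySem

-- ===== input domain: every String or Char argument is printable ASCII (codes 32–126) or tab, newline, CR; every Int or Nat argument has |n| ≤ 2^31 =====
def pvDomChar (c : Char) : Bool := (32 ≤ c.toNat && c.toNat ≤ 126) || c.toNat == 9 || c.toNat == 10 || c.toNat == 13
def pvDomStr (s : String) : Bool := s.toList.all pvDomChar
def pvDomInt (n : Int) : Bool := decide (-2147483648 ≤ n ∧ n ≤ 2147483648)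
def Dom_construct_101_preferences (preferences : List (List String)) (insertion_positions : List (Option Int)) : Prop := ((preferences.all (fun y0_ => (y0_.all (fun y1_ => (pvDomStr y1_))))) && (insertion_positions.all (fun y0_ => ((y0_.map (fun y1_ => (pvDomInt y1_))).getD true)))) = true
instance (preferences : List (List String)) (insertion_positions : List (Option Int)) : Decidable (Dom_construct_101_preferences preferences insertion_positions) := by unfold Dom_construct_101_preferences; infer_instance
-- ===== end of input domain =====

-- B builds the 101×n_voters matrix cell-by-cell from precomputed clamped insertion
-- positions (offset indexing), instead of A's transpose + list.insert + re-read (alternative decomposition).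

-- ===== PORT A =====
-- ranking.insert(pos, "100") with pos already clamped to [0, len]
def pvInsA (p : Int) (l : List String) : List String :=
  l.insertIdx ((max 0 (min p (l.length : Int))).toNat) "100"

-- the `for voter_idx, pos in enumerate(insertion_positions)` loop
def pvApplyInsA : List (List String) → List (Option Int) → Nat → List (List String)
  | vr, [], _ => vr
  | vr, none :: rest, i => pvApplyInsA vr rest (i + 1)
  | vr, some p :: rest, i =>
      pvApplyInsA (if i < vr.length then vr.set i (pvInsA p (vr.getD i [])) else vr) rest (i + 1)

def construct_101_preferences (preferences : List (List String)) (insertion_positions : List (Option Int)) : List (List String) :=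
  let n_ranks := preferences.length
  let n_voters := match preferences with | [] => 0 | r0 :: _ => r0.length
  let voter_rankings := (List.range n_voters).map
    (fun v => (List.range n_ranks).map (fun r => (preferences.getD r []).getD v ""))
  let vr := pvApplyInsA voter_rankings insertion_positions 0
  (List.range 101).map (fun r => (List.range n_voters).map (fun v =>
    let rk := vr.getD v []
    if r < rk.length then rk.getD r "" else "100"))

-- ===== PORT B =====
def construct_101_preferences_alt (preferences : List (List String)) (insertion_positions : List (Option Int)) : List (List String) :=
  let n_ranks := preferences.length
  let n_voters := match preferences with | [] => 0 | r0 :: _ => r0.length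
  let pos : List (Option Nat) := (List.range n_voters).map (fun v =>
    match insertion_positions.getD v none with
    | none => none
    | some p => some ((max 0 (min p (n_ranks : Int))).toNat))
  (List.range 101).map (fun r => (List.range n_voters).map (fun v =>
    match pos.getD v none with
    | none =>
        if r < n_ranks then (preferences.getD r []).getD v "" else "100"
    | some q =>
        if r = q then "100"
        else
          if (if r < q then r else r - 1) < n_ranks then
            (preferences.getD (if r < q then r else r - 1) []).getD v ""
          else "100"))

-- ===== PRECONDITION & SPEC =====
-- Pre_ excludes exactly the inputs where Python A raises IndexError: a row of
-- `preferences` shorter than row 0 (the transpose comprehension indexes every row at all columns of row 0).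
def Pre_construct_101_preferences (preferences : List (List String)) (insertion_positions : List (Option Int)) : Prop :=
  ∀ row ∈ preferences, (preferences.headD []).length ≤ row.length
instance (preferences : List (List String)) (insertion_positions : List (Option Int)) : Decidable (Pre_construct_101_preferences preferences insertion_positions) := by unfold Pre_construct_101_preferences; infer_instance

def pvWitness_construct_101_preferences : List (List String) × List (Option Int) :=
  ([["a", "b"], ["c", "d"]], [some 1, none])

def Spec_construct_101_preferences (preferences : List (List String)) (insertion_positions : List (Option Int)) (out : List (List String)) : Prop := out = construct_101_preferences_alt preferences insertion_positions
instance (preferences : List (List String)) (insertion_positions : List (Option Int)) (out : List (List String)) : Decidable (Spec_construct_101_preferences preferences insertion_positions out) := by unfold Spec_construct_101_preferences; infer_instance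

-- ===== CLAIM (what is proved, stated in full; the proofs are below) =====
def Claim_equal_construct_101_preferences : Prop := ∀ (preferences : List (List String)) (insertion_positions : List (Option Int)), Dom_construct_101_preferences preferences insertion_positions → Pre_construct_101_preferences preferences insertion_positions → Spec_construct_101_preferences preferences insertion_positions (construct_101_preferences preferences insertion_positions)

-- ===== LEMMAS AND PROOFS =====

theorem pvApplyInsA_getD (ips : List (Option Int)) (vr : List (List String)) (i v : Nat)
    (hv : v < vr.length) :
    (pvApplyInsA vr ips i).getD v [] =
      match (if i ≤ v then ips.getD (v - i) none else none) with
      | some p => pvInsA p (vr.getD v [])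
      | none => vr.getD v [] := by
  induction ips generalizing vr i with
  | nil => simp [pvApplyInsA]
  | cons hd tl ih =>
    cases hd with
    | none =>
      rw [pvApplyInsA, ih vr (i + 1) hv]
      by_cases h1 : i + 1 ≤ v
      · have h2 : i ≤ v := by omega
        have : v - i = (v - (i + 1)) + 1 := by omega
        simp [h1, h2, this]
      · by_cases h2 : i ≤ v
        · have : v = i := by omega
          simp [h1, h2, this]
        · simp [h1, h2]
    | some p =>
      rw [pvApplyInsA]
      set vr' := if i < vr.length then vr.set i (pvInsA p (vr.getD i [])) else vr with hvr'
      have hlen : vr'.length = vr.length := by rw [hvr']; split <;> simp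
      have hv' : v < vr'.length := by omega
      rw [ih vr' (i + 1) hv']
      have hget : vr'.getD v [] =
          if v = i then pvInsA p (vr.getD v []) else vr.getD v [] := by
        rw [hvr']
        by_cases hi : i < vr.length
        · simp only [hi, if_true]
          by_cases hvi : v = i
          · subst hvi
            simp [List.getD, hi]
          · simp [List.getD, List.getElem?_set_ne (Ne.symm hvi), hvi]
        · have hvi : v ≠ i := by omega
          simp [hi, hvi]
      simp only [List.getD] at hget ⊢
      by_cases h1 : i + 1 ≤ v
      · have h2 : i ≤ v := by omega
        have hvi : v ≠ i := by omega
        have : v - i = (v - (i + 1)) + 1 := by omega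
        simp [h1, h2, this, hget, hvi]
      · by_cases h2 : i ≤ v
        · have hvi : v = i := by omega
          subst hvi
          simp [h1, h2, hget]
        · have hvi : v ≠ i := by omega
          simp [h1, h2, hget, hvi]

theorem getD_map_range {α : Type} (n r : Nat) (f : Nat → α) (d : α) (hr : r < n) :
    ((List.range n).map f).getD r d = f r := by
  simp [List.getD, List.getElem?_map, List.getElem?_range, hr]

theorem insertIdx_getD (l : List String) (q r : Nat) (a d : String) (hq : q ≤ l.length) :
    (l.insertIdx q a).getD r d =
      if r < q then l.getD r d else if r = q then a else l.getD (r - 1) d := by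
  simp only [List.getD]
  by_cases h1 : r < q
  · rw [List.getElem?_insertIdx_of_lt h1]
    simp [h1]
  · by_cases h2 : r = q
    · subst h2
      rw [List.getElem?_insertIdx_self, if_pos hq]
      simp
    · have h3 : q < r := by omega
      rw [List.getElem?_insertIdx_of_gt h3]
      simp [h1, h2]

-- the per-cell equality: A reads rank r of the ranking-with-insert; B computes the same cell by offset indexing
theorem cellA_eq_cellB (f : Nat → String) (n r q : Nat) (hq : q ≤ n) :
    (if r < (((List.range n).map f).insertIdx q "100").length
      then (((List.range n).map f).insertIdx q "100").getD r "" else "100")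
    = if r = q then "100"
      else if (if r < q then r else r - 1) < n then f (if r < q then r else r - 1) else "100" := by
  have hlen : (((List.range n).map f).insertIdx q "100").length = n + 1 := by
    rw [List.length_insertIdx_of_le_length (by simpa using hq)]
    simp
  rw [hlen, insertIdx_getD _ _ _ _ _ (by simpa using hq)]
  split_ifs <;> first
    | rfl
    | omega
    | (rw [getD_map_range _ _ _ _ (by omega)])

-- ===== VERDICT (by name: the statement is the Claim_ definition above) =====
theorem construct_101_preferences_spec : Claim_equal_construct_101_preferences := by
  intro preferences insertion_positions _ _
  unfold Spec_construct_101_preferences construct_101_preferences construct_101_preferences_alt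
  simp only []
  apply List.map_congr_left
  intro r hr
  apply List.map_congr_left
  intro v hv
  rw [List.mem_range] at hv
  set n_ranks := preferences.length with hnr
  set n_voters := (match preferences with | [] => 0 | r0 :: _ => r0.length) with hnv
  set f : Nat → String := fun r => (preferences.getD r []).getD v "" with hf
  set base := (List.range n_voters).map
    (fun v => (List.range n_ranks).map (fun r => (preferences.getD r []).getD v "")) with hbase
  have hbl : base.length = n_voters := by rw [hbase]; simp
  have hbv : v < base.length := by omega
  have hbget : base.getD v [] = (List.range n_ranks).map f := by
    rw [hbase, getD_map_range _ v _ [] hv]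
  -- resolve B's pos table
  rw [getD_map_range _ v _ none hv]
  -- resolve A's vr
  rw [pvApplyInsA_getD insertion_positions base 0 v hbv]
  simp only [Nat.zero_le, if_true, Nat.sub_zero]
  cases hips : insertion_positions.getD v none with
  | none =>
    rw [hbget]
    by_cases hrn : r < n_ranks
    · rw [getD_map_range _ r _ "" hrn]; simp [hrn, hf]
    · simp [hrn]
  | some p =>
    rw [hbget]
    simp only [pvInsA]
    have hql : ((max 0 (min p (((List.range n_ranks).map f).length : Int))).toNat)
        = (max 0 (min p (n_ranks : Int))).toNat := by simp
    rw [hql, cellA_eq_cellB f n_ranks r ((max 0 (min p (n_ranks : Int))).toNat) (by omega)]
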